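-- pv_equiv track=rewrite | github.com/edno2819/Telegram_Dash_Anality | DashBoard/utils.py | filter_list_strings
-- ===== SOURCE A (Python) =====
-- def filter_list_strings(lista, strings):
--     if strings==False:
--         return lista
--
--     new_list = list()
--
--     for item in lista:
--         inpu = True
--         for string_filter in strings:
--             if string_filter.upper().strip() not in item.upper().split(' '):
--                 inpu = False
--         if inpu:
--             new_list.append(item)
--     return new_list
-- ===== SOURCE B (Python) =====
-- def filter_list_strings(lista, strings):
--     if strings == False:
--         return lista
--     result = list(lista)
--     for string_filter in strings:
--         key = string_filter.upper().strip()
--         result = [item for item in result if key in item.upper().split(' ')]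
--     return result
-- ===== Notes on version B (the rewrite author's own statement) =====
-- stated objective: alternative
-- what changed: Inverts the loop nesting: instead of scanning every item and re-checking all filter words with a boolean flag, B makes one narrowing filter pass per filter word over a shrinking candidate list (and hoists the word's upper().strip() out of the item loop).
import Mathlib
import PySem

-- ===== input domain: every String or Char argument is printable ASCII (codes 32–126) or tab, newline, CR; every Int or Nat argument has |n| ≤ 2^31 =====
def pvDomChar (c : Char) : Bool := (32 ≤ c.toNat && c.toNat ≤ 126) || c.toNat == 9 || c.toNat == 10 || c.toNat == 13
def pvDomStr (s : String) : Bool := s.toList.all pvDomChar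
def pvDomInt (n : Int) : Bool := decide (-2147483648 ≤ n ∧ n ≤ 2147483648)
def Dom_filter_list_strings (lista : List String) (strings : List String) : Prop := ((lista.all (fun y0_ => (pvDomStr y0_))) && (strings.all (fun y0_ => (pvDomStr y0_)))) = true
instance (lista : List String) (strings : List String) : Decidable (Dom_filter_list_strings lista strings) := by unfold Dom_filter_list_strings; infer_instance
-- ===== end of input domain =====

-- B inverts the loop nesting into one narrowing filter pass per filter word; same cost, plainer structure.
-- (The Python guard `if strings==False: return lista` can never fire for a list argument, so it has no Lean counterpart.)

-- ===== PORT A =====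
-- string_filter.upper().strip() in item.upper().split(' ')  (split? " " is always `some` since the sep is nonempty)
def pvHit (string_filter : String) (item : String) : Bool :=
  ((PySem.Str.split? (PySem.Str.upper item) " ").getD []).contains (PySem.Str.strip (PySem.Str.upper string_filter))

def filter_list_strings (lista : List String) (strings : List String) : List String :=
  lista.foldl (fun new_list item =>
    let inpu := strings.foldl (fun inpu string_filter =>
      if !(pvHit string_filter item) then false else inpu) true
    if inpu then new_list ++ [item] else new_list) []

-- ===== PORT B =====
def filter_list_strings_alt (lista : List String) (strings : List String) : List String :=
  strings.foldl (fun result string_filter =>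
    result.filter (fun item => pvHit string_filter item)) lista

-- ===== PRECONDITION & SPEC =====
def Spec_filter_list_strings (lista : List String) (strings : List String) (out : List String) : Prop := out = filter_list_strings_alt lista strings
instance (lista : List String) (strings : List String) (out : List String) : Decidable (Spec_filter_list_strings lista strings out) := by unfold Spec_filter_list_strings; infer_instance

-- ===== CLAIM (what is proved, stated in full; the proofs are below) =====
def Claim_equal_filter_list_strings : Prop := ∀ (lista : List String) (strings : List String), Dom_filter_list_strings lista strings → Spec_filter_list_strings lista strings (filter_list_strings lista strings)

-- ===== LEMMAS AND PROOFS =====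

-- ===== VERDICT (by name: the statement is the Claim_ definition above) =====
-- inner flag loop of A computes "every filter word hits"
theorem pv_inner (strings : List String) (item : String) (b : Bool) :
    strings.foldl (fun inpu string_filter =>
      if !(pvHit string_filter item) then false else inpu) b
    = (b && strings.all (fun s => pvHit s item)) := by
  induction strings generalizing b with
  | nil => simp
  | cons s ss ih =>
    simp only [List.foldl_cons, List.all_cons, ih]
    cases h : pvHit s item <;> simp [h]

-- A is a single filter by the conjunction of all hits
theorem pv_A_eq_filter (lista strings : List String) :
    filter_list_strings lista strings
    = lista.filter (fun item => strings.all (fun s => pvHit s item)) := by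
  unfold filter_list_strings
  simp only [pv_inner, Bool.true_and]
  simpa using PySem.List.foldl_append_if_eq_filter
    (l := lista) (acc := ([] : List String))
    (p := fun item => strings.all (fun s => pvHit s item))

-- B's successive narrowing passes compute the same conjunctive filter
theorem pv_B_eq_filter (lista strings : List String) :
    filter_list_strings_alt lista strings
    = lista.filter (fun item => strings.all (fun s => pvHit s item)) := by
  unfold filter_list_strings_alt
  induction strings generalizing lista with
  | nil => simp
  | cons s ss ih =>
    simp only [List.foldl_cons, ih, List.filter_filter, List.all_cons]
    exact List.filter_congr (fun x _ => by cases pvHit s x <;> simp)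

theorem filter_list_strings_spec : Claim_equal_filter_list_strings := by
  intro lista strings _
  unfold Spec_filter_list_strings
  rw [pv_A_eq_filter, pv_B_eq_filter]
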